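-- pv_equiv track=rewrite | github.com/MadhuriGhadge/mathminds-ai | phase0/MEX.py | calculate_mex
-- ===== SOURCE A (Python) =====
-- def calculate_mex(arr):
--     n = len(arr)
--     mex_table = []
--     for i in range(n):
--         seen = set()  # To track elements in the current subarray
--         mex = 0  # Start with the smallest non-negative integer
--         for j in range(i, n):
--             seen.add(arr[j])
--             while mex in seen:
--                 mex += 1
--             mex_table.append((i, j, mex))  # Add the MEX of the subarray (i, j)
--     return mex_table
-- ===== SOURCE B (Python) =====
-- def calculate_mex(arr):
--     n = len(arr)
--     out = []
--     for i in range(n):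
--         for j in range(i, n):
--             m = 0
--             for v in sorted(set(arr[i:j + 1])):
--                 if v == m:
--                     m += 1
--                 elif v > m:
--                     break
--             out.append((i, j, m))
--     return out
-- ===== Notes on version B (the rewrite author's own statement) =====
-- stated objective: alternative
-- what changed: B replaces A's carried (seen, mex) state and 'while mex in seen' membership loop by an independent per-subarray sorted-scan: it sorts the distinct elements of arr[i:j+1] and walks the sorted list counting up until the first gap.
import Mathlib
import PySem

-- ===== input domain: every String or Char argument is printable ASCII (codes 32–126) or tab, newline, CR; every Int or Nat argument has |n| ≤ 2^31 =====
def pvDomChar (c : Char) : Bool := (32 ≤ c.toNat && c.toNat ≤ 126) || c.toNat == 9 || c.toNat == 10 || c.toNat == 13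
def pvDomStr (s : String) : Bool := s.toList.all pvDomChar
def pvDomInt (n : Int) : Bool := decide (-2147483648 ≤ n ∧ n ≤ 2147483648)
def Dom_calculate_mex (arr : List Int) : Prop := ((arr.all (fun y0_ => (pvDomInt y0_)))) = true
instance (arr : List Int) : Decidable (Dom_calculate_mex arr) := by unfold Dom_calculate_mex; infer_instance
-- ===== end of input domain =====

-- B computes each subarray's MEX independently by sorting the distinct elements of arr[i:j+1]
-- and scanning the sorted list for the first gap (alternative decomposition, no carried state);
-- A = B is proved on all inputs.

-- ===== PORT A =====
-- 'while mex in seen: mex += 1' — fuel-bounded loop; fuel seen.length + 1 is always enough,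
-- since each pass consumes a distinct member of 'seen' that is ≥ the current value.
def mexAdvance (seen : List Int) : Int → Nat → Int
  | m, 0 => m
  | m, fuel + 1 => if seen.contains m then mexAdvance seen (m + 1) fuel else m

-- inner loop body of A: state = (seen, mex, mex_table)
def stepA (arr : List Int) (i : Int) (st : PySem.Set Int × Int × List (Int × Int × Int))
    (j : Int) : PySem.Set Int × Int × List (Int × Int × Int) :=
  let seen := PySem.Set.add st.1 (PySem.List.pyGetD arr j 0)   -- seen.add(arr[j]); j in range here
  let mex := mexAdvance seen st.2.1 (seen.length + 1)
  (seen, mex, st.2.2 ++ [(i, j, mex)])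

def calculate_mex (arr : List Int) : List (Int × Int × Int) :=
  let n : Int := arr.length
  (PySem.List.pyRange 0 n 1).foldl
    (fun table i =>
      ((PySem.List.pyRange i n 1).foldl (stepA arr i) (PySem.Set.empty, 0, table)).2.2)
    []

-- ===== PORT B =====
-- 'for v in sorted(set(...)): if v == m: m += 1 elif v > m: break' — structural recursion
-- on the sorted list; returning m transcribes the break.
def scanMex : List Int → Int → Int
  | [], m => m
  | v :: rest, m =>
      if v = m then scanMex rest (m + 1)
      else if v > m then m
      else scanMex rest m

def calculate_mex_alt (arr : List Int) : List (Int × Int × Int) :=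
  let n : Int := arr.length
  (PySem.List.pyRange 0 n 1).foldl
    (fun out i =>
      (PySem.List.pyRange i n 1).foldl
        (fun out j =>
          let vals := PySem.Set.ofList (PySem.List.slice arr (some i) (some (j + 1)))
          let m := scanMex (PySem.List.sorted vals (fun x => x) false) 0
          out ++ [(i, j, m)])
        out)
    []

-- ===== PRECONDITION & SPEC =====
def Spec_calculate_mex (arr : List Int) (out : List (Int × Int × Int)) : Prop := out = calculate_mex_alt arr
instance (arr : List Int) (out : List (Int × Int × Int)) : Decidable (Spec_calculate_mex arr out) := by unfold Spec_calculate_mex; infer_instance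

-- ===== CLAIM (what is proved, stated in full; the proofs are below) =====
def Claim_equal_calculate_mex : Prop := ∀ (arr : List Int), Dom_calculate_mex arr → Spec_calculate_mex arr (calculate_mex arr)

-- ===== LEMMAS AND PROOFS =====

-- the result of the while-loop is at least its start
lemma mexAdvance_le (seen : List Int) : ∀ (fuel : Nat) (m : Int), m ≤ mexAdvance seen m fuel := by
  intro fuel
  induction fuel with
  | zero => intro m; simp [mexAdvance]
  | succ f ih =>
    intro m
    simp only [mexAdvance]
    split
    · exact le_trans (by omega) (ih (m + 1))
    · exact le_refl m

-- with enough fuel the while-loop computes the least r ≥ m outside 'seen'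
lemma mexAdvance_spec (seen : List Int) :
    ∀ (fuel : Nat) (m : Int),
      (seen.filter (fun x => decide (m ≤ x))).length < fuel →
      mexAdvance seen m fuel ∉ seen ∧
        ∀ k, m ≤ k → k < mexAdvance seen m fuel → k ∈ seen := by
  intro fuel
  induction fuel with
  | zero => intro m h; omega
  | succ f ih =>
    intro m h
    simp only [mexAdvance]
    by_cases hm : seen.contains m
    · simp only [hm, if_true]
      have hmem : m ∈ seen := List.mem_of_elem_eq_true hm
      have hfilt : (seen.filter (fun x => decide (m + 1 ≤ x))).length
          < (seen.filter (fun x => decide (m ≤ x))).length := by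
        have heq : seen.filter (fun x => decide (m + 1 ≤ x))
            = (seen.filter (fun x => decide (m ≤ x))).filter (fun x => decide (m + 1 ≤ x)) := by
          rw [List.filter_filter]
          apply List.filter_congr
          intro x _
          by_cases h1 : (m:Int) + 1 ≤ x <;> by_cases h2 : m ≤ x <;> simp [h1, h2]
          omega
        rw [heq]
        apply List.length_filter_lt_length_iff_exists.mpr
        refine ⟨m, ?_, ?_⟩
        · simp [List.mem_filter, hmem]
        · simp
      have hrec := ih (m + 1) (by omega)
      refine ⟨hrec.1, ?_⟩
      intro k hk1 hk2
      rcases eq_or_ne k m with hkm | hkm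
      · exact hkm ▸ hmem
      · have hk' : m + 1 ≤ k := by omega
        exact hrec.2 k hk' hk2
    · simp only [hm]
      refine ⟨fun hc => hm (List.elem_eq_true_of_mem hc), ?_⟩
      intro k hk1 hk2; simp at hk2; omega

-- fuel 'len + 1' is always enough
lemma fuel_ok (seen : List Int) (m : Int) :
    (seen.filter (fun x => decide (m ≤ x))).length < seen.length + 1 := by
  have := List.length_filter_le (fun x => decide (m ≤ x)) seen
  omega

-- on a strictly increasing list, scanMex from m computes the least r ≥ m outside the list
lemma scanMex_spec : ∀ (L : List Int), L.Pairwise (· < ·) → ∀ (m : Int),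
    m ≤ scanMex L m ∧ scanMex L m ∉ L ∧ ∀ k, m ≤ k → k < scanMex L m → k ∈ L := by
  intro L
  induction L with
  | nil => intro _ m; refine ⟨le_refl m, by simp, ?_⟩; intro k h1 h2; simp [scanMex] at h2; omega
  | cons v rest ih =>
    intro hp m
    have hv : ∀ x ∈ rest, v < x := fun x hx => (List.pairwise_cons.mp hp).1 x hx
    have hrest := ih (List.pairwise_cons.mp hp).2
    simp only [scanMex]
    by_cases hvm : v = m
    · simp only [hvm, if_true]
      obtain ⟨h1, h2, h3⟩ := hrest (m + 1)
      refine ⟨by omega, ?_, ?_⟩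
      · intro hc
        rcases List.mem_cons.mp hc with hc | hc
        · omega
        · exact h2 hc
      · intro k hk1 hk2
        rcases eq_or_ne k m with rfl | hne
        · exact List.mem_cons.mpr (Or.inl (by omega))
        · exact List.mem_cons.mpr (Or.inr (h3 k (by omega) hk2))
    · simp only [hvm, if_false]
      by_cases hgt : v > m
      · simp only [hgt, if_true]
        refine ⟨le_refl m, ?_, ?_⟩
        · intro hc
          rcases List.mem_cons.mp hc with hc | hc
          · omega
          · have := hv m hc; omega
        · intro k h1 h2; omega
      · simp only [hgt, if_false]
        obtain ⟨h1, h2, h3⟩ := hrest m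
        refine ⟨h1, ?_, ?_⟩
        · intro hc
          rcases List.mem_cons.mp hc with hc | hc
          · omega
          · exact h2 hc
        · intro k hk1 hk2
          exact List.mem_cons.mpr (Or.inr (h3 k hk1 hk2))

-- the two mex computations agree: B's sorted-scan equals A's advance from the carried mex,
-- provided every 0 ≤ k < mex is already in the set
lemma scan_eq_advance (l : List Int) (mex : Int) (hm : 0 ≤ mex)
    (hpre : ∀ k, 0 ≤ k → k < mex → k ∈ PySem.Set.ofList l) :
    scanMex (PySem.List.sorted (PySem.Set.ofList l) (fun x => x) false) 0
      = mexAdvance (PySem.Set.ofList l) mex ((PySem.Set.ofList l).length + 1) := by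
  set S := PySem.Set.ofList l with hS
  set L := PySem.List.sorted S (fun x => x) false with hL
  have hmemL : ∀ x : Int, x ∈ L ↔ x ∈ S := by
    intro x; rw [hL]; exact PySem.List.mem_sorted _ _ _ _
  have hpair : L.Pairwise (· < ·) := by
    rw [hL, hS]; exact PySem.List.sorted_ofList_pairwise_lt l
  obtain ⟨hge1, hnot1, hlt1⟩ := scanMex_spec L hpair 0
  obtain ⟨hnot2, hlt2⟩ := mexAdvance_spec S (S.length + 1) mex (fuel_ok S mex)
  have hge2 : mex ≤ mexAdvance S mex (S.length + 1) := mexAdvance_le S _ mex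
  by_contra hne
  rcases lt_or_gt_of_ne hne with hlt | hgt
  · -- scan result < advance result → scan result ∈ S, contra
    by_cases hr : scanMex L 0 < mex
    · exact hnot1 ((hmemL _).mpr (hpre _ hge1 hr))
    · exact hnot1 ((hmemL _).mpr (hlt2 _ (by omega) hlt))
  · exact hnot2 ((hmemL _).mp (hlt1 _ (by omega) hgt))

lemma slice_snoc (arr : List Int) (i j : Int) (hi : 0 ≤ i) (hij : i ≤ j)
    (hj : j < arr.length) :
    PySem.List.slice arr (some i) (some (j + 1))
      = PySem.List.slice arr (some i) (some j) ++ [arr.getD j.toNat 0] := by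
  obtain ⟨a, rfl⟩ : ∃ a : Nat, i = (a : Int) := ⟨i.toNat, by omega⟩
  obtain ⟨b, rfl⟩ : ∃ b : Nat, j = (b : Int) := ⟨j.toNat, by omega⟩
  rw [show ((b : Int) + 1) = ((b + 1 : Nat) : Int) by push_cast; ring]
  rw [PySem.List.slice_natCast, PySem.List.slice_natCast]
  have hb : b < arr.length := by omega
  have hab : a ≤ b := by omega
  rw [show (((b : Int)).toNat) = b by omega]
  rw [List.getD_eq_getElem _ _ hb]
  rw [show b + 1 - a = (b - a) + 1 by omega]
  rw [List.take_add_one, List.getElem?_drop]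
  rw [show a + (b - a) = b by omega]
  simp [List.getElem?_eq_getElem hb]

lemma slice_self (arr : List Int) (i : Int) (hi : 0 ≤ i) :
    PySem.List.slice arr (some i) (some i) = [] := by
  have hi' : i = (i.toNat : Int) := by omega
  rw [hi', PySem.List.slice_natCast]
  simp

lemma ofList_snoc (l : List Int) (x : Int) :
    PySem.Set.ofList (l ++ [x]) = PySem.Set.add (PySem.Set.ofList l) x := by
  rw [PySem.Set.ofList_eq_foldl, PySem.Set.ofList_eq_foldl, List.foldl_append]
  rfl

-- inner loops agree: A's carried (seen, mex) advance equals B's per-subarray sorted-scan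
lemma inner_eq (arr : List Int) (i : Int) (hi : 0 ≤ i) :
    ∀ (fuel : Nat) (j0 : Int), fuel = (arr.length - j0).toNat → i ≤ j0 →
    ∀ (s : PySem.Set Int) (mex : Int) (t : List (Int × Int × Int)),
      s = PySem.Set.ofList (PySem.List.slice arr (some i) (some j0)) →
      mex ∉ s → 0 ≤ mex → (∀ k, 0 ≤ k → k < mex → k ∈ s) →
      ((PySem.List.pyRange j0 arr.length 1).foldl (stepA arr i) (s, mex, t)).2.2
        = (PySem.List.pyRange j0 arr.length 1).foldl
            (fun out j =>
              let vals := PySem.Set.ofList (PySem.List.slice arr (some i) (some (j + 1)))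
              let m := scanMex (PySem.List.sorted vals (fun x => x) false) 0
              out ++ [(i, j, m)]) t := by
  intro fuel
  induction fuel with
  | zero =>
    intro j0 hf hij s mex t hs hm1 hm2 hm3
    have hj : (arr.length : Int) ≤ j0 := by omega
    have : PySem.List.pyRange j0 arr.length 1 = [] := by
      apply List.eq_nil_iff_forall_not_mem.mpr
      intro x hx
      rw [PySem.List.mem_pyRange_one] at hx
      omega
    simp [this]
  | succ f ih =>
    intro j0 hf hij s mex t hs hm1 hm2 hm3
    have hj : j0 < (arr.length : Int) := by omega
    rw [PySem.List.pyRange_one_cons hj]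
    simp only [List.foldl_cons]
    have hget : PySem.List.pyGetD arr j0 0 = arr.getD j0.toNat 0 :=
      PySem.List.pyGetD_of_nonneg arr 0 (by omega)
    have hseen : PySem.Set.add s (PySem.List.pyGetD arr j0 0)
        = PySem.Set.ofList (PySem.List.slice arr (some i) (some (j0 + 1))) := by
      rw [hget, hs, slice_snoc arr i j0 hi hij hj, ofList_snoc]
    set seen := PySem.Set.add s (PySem.List.pyGetD arr j0 0) with hseendef
    have hsub : ∀ x, x ∈ s → x ∈ seen := by
      intro x hx; rw [hseendef, PySem.Set.mem_add]; exact Or.inl hx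
    have hpre : ∀ k, 0 ≤ k → k < mex → k ∈ seen := fun k h1 h2 => hsub k (hm3 k h1 h2)
    obtain ⟨hn, hlt⟩ := mexAdvance_spec seen (seen.length + 1) mex (fuel_ok seen mex)
    have hge : mex ≤ mexAdvance seen mex (seen.length + 1) := mexAdvance_le seen _ mex
    -- B's sorted-scan at (i, j0) equals A's advanced mex
    have hscan : scanMex (PySem.List.sorted
          (PySem.Set.ofList (PySem.List.slice arr (some i) (some (j0 + 1)))) (fun x => x) false) 0
        = mexAdvance seen mex (seen.length + 1) := by
      have hpre' := hpre
      rw [hseen] at hpre'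
      have h := scan_eq_advance (PySem.List.slice arr (some i) (some (j0 + 1))) mex hm2 hpre'
      rw [hseen]
      exact h
    show ((PySem.List.pyRange (j0+1) arr.length 1).foldl (stepA arr i) (stepA arr i (s, mex, t) j0)).2.2 = _
    have hstepA : stepA arr i (s, mex, t) j0
        = (seen, mexAdvance seen mex (seen.length + 1),
            t ++ [(i, j0, mexAdvance seen mex (seen.length + 1))]) := rfl
    rw [hstepA]
    simp only [hscan]
    exact ih (j0 + 1) (by omega) (by omega) seen _ _ hseen hn (by omega)
      (fun k h1 h2 => by
        by_cases hkm : k < mex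
        · exact hpre k h1 hkm
        · exact hlt k (by omega) h2)

-- ===== VERDICT (by name: the statement is the Claim_ definition above) =====
theorem calculate_mex_spec : Claim_equal_calculate_mex := by
  intro arr _
  unfold Spec_calculate_mex calculate_mex calculate_mex_alt
  apply PySem.List.foldl_congr_mem
  intro table i hi
  rw [PySem.List.mem_pyRange_one] at hi
  exact inner_eq arr i hi.1 (arr.length - i).toNat i rfl (le_refl i)
    PySem.Set.empty 0 table (by rw [slice_self arr i hi.1]; rfl)
    (by simp [PySem.Set.empty]) (le_refl 0) (fun k h1 h2 => by omega)
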